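-- pv_equiv track=rewrite | github.com/jsabat1/prg-basics-jsabat | mocktest3/mock1/p7.py | f
-- ===== SOURCE A (Python) =====
-- def f(arr2D):
--     col_sums = [sum(col) for col in zip(*arr2D)]
--     sum_counts = {}
--
--     for s in col_sums:
--         if s in sum_counts:
--             sum_counts[s] += 1
--         else:
--             sum_counts[s] = 1
--
--     for count in sum_counts.values():
--         if count > 1:
--             return True
--
--     return False
-- ===== SOURCE B (Python) =====
-- def f(arr2D):
--     sums = None
--     for row in arr2D:
--         if sums is None:
--             sums = list(row)
--         else:
--             sums = [a + b for a, b in zip(sums, row)]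
--     if sums is None:
--         sums = []
--     sums.sort()
--     return any(a == b for a, b in zip(sums, sums[1:]))
-- ===== Notes on version B (the rewrite author's own statement) =====
-- stated objective: alternative
-- what changed: B never transposes and never counts: it folds the rows into one running column-sum vector (elementwise zip-add), then sorts that vector and reports a duplicate iff some adjacent pair of the sorted vector is equal.
import Mathlib
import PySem

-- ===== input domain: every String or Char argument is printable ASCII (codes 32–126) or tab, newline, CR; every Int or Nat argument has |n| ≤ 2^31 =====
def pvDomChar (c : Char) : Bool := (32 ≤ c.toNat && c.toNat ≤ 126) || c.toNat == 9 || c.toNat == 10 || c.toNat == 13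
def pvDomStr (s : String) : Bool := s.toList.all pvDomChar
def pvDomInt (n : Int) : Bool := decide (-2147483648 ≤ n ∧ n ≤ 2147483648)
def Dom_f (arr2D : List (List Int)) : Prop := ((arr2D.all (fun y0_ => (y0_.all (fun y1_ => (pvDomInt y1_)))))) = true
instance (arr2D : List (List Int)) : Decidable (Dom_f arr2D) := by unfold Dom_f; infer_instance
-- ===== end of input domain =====

-- B drops A's transpose and counting dict: it folds the rows into one running column-sum
-- vector, sorts it, and looks for an equal adjacent pair (alternative algorithm; same cost).
-- ===== PORT A =====
-- A's comprehension 'col_sums = [sum(col) for col in zip(*arr2D)]';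
-- zip(*rows) truncates to the shortest row (and yields nothing when there are no rows).
def colSums (arr2D : List (List Int)) : List Int :=
  match arr2D with
  | [] => []
  | r :: rs =>
    let m := rs.foldl (fun m row => min m row.length) r.length
    (List.range m).map (fun j => ((r :: rs).map (fun row => row.getD j 0)).sum)

-- A's first loop: 'for s in col_sums: if s in sum_counts: sum_counts[s] += 1 else: sum_counts[s] = 1'
def sumCounts (cs : List Int) : PySem.Dict Int Int :=
  cs.foldl
    (fun d s => if d.contains s then d.insert s (d.getD s 0 + 1) else d.insert s 1)
    (PySem.Dict.empty)

def f (arr2D : List (List Int)) : Bool :=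
  let cs := colSums arr2D
  let counts := sumCounts cs
  -- A's second loop: 'for count in sum_counts.values(): if count > 1: return True' / 'return False'
  counts.values.any (fun c => decide (1 < c))

-- ===== PORT B =====
-- B's loop: 'sums = None; for row in arr2D: sums = list(row) if first else zip-add' —
-- the None/first-row case is the fold's initial accumulator; Python's zip truncates
-- to the shorter operand, which is List.zip.
def foldSums (arr2D : List (List Int)) : List Int :=
  match arr2D with
  | [] => []
  | r :: rs => rs.foldl (fun acc row => (acc.zip row).map (fun p => p.1 + p.2)) r

def f_alt (arr2D : List (List Int)) : Bool :=
  -- 'sums.sort()' then 'any(a == b for a, b in zip(sums, sums[1:]))' (sums[1:] = tail)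
  let s := PySem.List.sorted (foldSums arr2D) (fun x => x) false
  (s.zip s.tail).any (fun p => p.1 == p.2)

-- ===== PRECONDITION & SPEC =====
def Spec_f (arr2D : List (List Int)) (out : Bool) : Prop := out = f_alt arr2D
instance (arr2D : List (List Int)) (out : Bool) : Decidable (Spec_f arr2D out) := by unfold Spec_f; infer_instance

-- ===== CLAIM (what is proved, stated in full; the proofs are below) =====
def Claim_equal_f : Prop := ∀ (arr2D : List (List Int)), Dom_f arr2D → Spec_f arr2D (f arr2D)

-- ===== LEMMAS AND PROOFS =====

-- folding min over row lengths never exceeds the start value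
lemma foldl_min_le (rs : List (List Int)) (n : Nat) :
    rs.foldl (fun m row => min m row.length) n ≤ n := by
  induction rs generalizing n with
  | nil => exact le_rfl
  | cons row rs ih => exact le_trans (ih (min n row.length)) (min_le_left _ _)

-- B's running zip-add fold computes A's transposed column sums
lemma fold_eq_col (rs : List (List Int)) (r : List Int) :
    rs.foldl (fun acc row => (acc.zip row).map (fun p => p.1 + p.2)) r =
      (List.range (rs.foldl (fun m row => min m row.length) r.length)).map
        (fun j => ((r :: rs).map (fun row => row.getD j 0)).sum) := by
  induction rs generalizing r with
  | nil =>
    simp only [List.foldl_nil]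
    apply List.ext_getElem
    · simp
    · intro i hi _
      simp only [List.getElem_map, List.getElem_range, List.map_cons, List.map_nil,
        List.sum_cons, List.sum_nil, add_zero]
      rw [List.getD_eq_getElem r 0 (by simpa using hi)]
  | cons row rs ih =>
    simp only [List.foldl_cons]
    rw [ih]
    have hlen : ((r.zip row).map (fun p : Int × Int => p.1 + p.2)).length
        = min r.length row.length := by simp
    rw [hlen]
    apply List.map_congr_left
    intro j hj
    have hj' : j < min r.length row.length := by
      have := foldl_min_le rs (min r.length row.length)
      have hjm := List.mem_range.mp hj
      omega
    have hjr : j < r.length := lt_of_lt_of_le hj' (by omega)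
    have hjrow : j < row.length := lt_of_lt_of_le hj' (by omega)
    have hzip : ((r.zip row).map (fun p : Int × Int => p.1 + p.2)).getD j 0
        = r[j] + row[j] := by
      rw [List.getD_eq_getElem _ 0 (by simp; omega)]
      simp
    simp only [List.map_cons, List.sum_cons, hzip,
      List.getD_eq_getElem r 0 hjr, List.getD_eq_getElem row 0 hjrow]
    ring

-- A's counting fold is the Counter fold: in the else-branch the missing key has getD = 0.
lemma fold_eq_counter (cs : List Int) :
    sumCounts cs = PySem.Dict.counter cs := by
  unfold sumCounts
  have h : (fun (d : PySem.Dict Int Int) (s : Int) =>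
      if d.contains s then d.insert s (d.getD s 0 + 1) else d.insert s 1)
      = (fun (d : PySem.Dict Int Int) (s : Int) => d.insert s (d.getD s 0 + 1)) := by
    funext d s
    by_cases hc : d.contains s = true
    · simp [hc]
    · have hc' : d.contains s = false := by simpa using hc
      simp [hc, PySem.Dict.getD_of_not_contains _ _ hc']
  rw [h, PySem.Dict.foldl_insert_getD_add_one_eq_counter]

-- A's value: some count exceeds 1 iff the column-sum list has a repeat
lemma f_eq_not_nodup (arr2D : List (List Int)) :
    f arr2D = decide (¬ (colSums arr2D).Nodup) := by
  show (sumCounts (colSums arr2D)).values.any (fun c => decide (1 < c)) = _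
  rw [fold_eq_counter,
    PySem.Dict.values_eq_map_keys _ (PySem.Dict.nodup_keys_counter _) 0,
    PySem.Dict.keys_counter]
  rw [Bool.eq_iff_iff]
  simp only [List.any_map, List.any_eq_true, Function.comp,
    PySem.Dict.getD_counter, decide_eq_true_eq]
  constructor
  · rintro ⟨k, _, hcnt⟩
    rw [List.nodup_iff_count_le_one]
    push Not
    exact ⟨k, by exact_mod_cast hcnt⟩
  · intro hnd
    rw [List.nodup_iff_count_le_one] at hnd
    push Not at hnd
    obtain ⟨k, hk⟩ := hnd
    refine ⟨k, ?_, by exact_mod_cast hk⟩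
    exact (PySem.Set.mem_ofList _ _).mpr (List.count_pos_iff.mp (by omega))

-- in a ≤-sorted list, an equal adjacent pair exists iff the list has a repeat
lemma adj_any_eq_not_nodup (s : List Int) (h : s.Pairwise (· ≤ ·)) :
    ((s.zip s.tail).any (fun p => p.1 == p.2)) = decide (¬ s.Nodup) := by
  induction s with
  | nil => simp
  | cons a t ih =>
    match t with
    | [] => simp
    | b :: t' =>
      have hpairs : (a :: b :: t').Pairwise (· ≤ ·) := h
      rw [List.pairwise_cons] at hpairs
      obtain ⟨hale, htp⟩ := hpairs
      have hab : a ≤ b := hale b (by simp)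
      simp only [List.tail_cons, List.zip_cons_cons, List.any_cons]
      by_cases heq : a = b
      · subst heq
        simp
      · have hrest := ih htp
        simp only [List.tail_cons] at hrest
        rw [hrest]
        have hanotin : a ∉ b :: t' := by
          intro hmem
          rcases List.mem_cons.mp hmem with h1 | h2
          · exact heq h1
          · have hble : b ≤ a := by
              rw [List.pairwise_cons] at htp
              exact htp.1 a h2
            exact heq (le_antisymm hab hble)
        have hnd : (a :: b :: t').Nodup ↔ (b :: t').Nodup := by
          simp [List.nodup_cons, hanotin]
        simp [beq_iff_eq, heq, hnd]

-- ===== VERDICT (by name: the statement is the Claim_ definition above) =====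
theorem f_spec : Claim_equal_f := by
  intro arr2D _
  unfold Spec_f f_alt
  have hfold : foldSums arr2D = colSums arr2D := by
    unfold foldSums colSums
    match arr2D with
    | [] => rfl
    | r :: rs => exact fold_eq_col rs r
  rw [hfold, f_eq_not_nodup,
    adj_any_eq_not_nodup _ (by simpa using PySem.List.sorted_pairwise (xs := colSums arr2D) (key := fun x => x))]
  congr 1
  simp [List.Perm.nodup_iff (PySem.List.sorted_perm (xs := colSums arr2D) (key := fun x => x) (rev := false))]
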